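-- pv_equiv track=rewrite | github.com/AleVlaKon/algorytm | 10/10.3/10.3.12.py | is_flippable_number
-- ===== SOURCE A (Python) =====
-- def is_flippable_number(num: str):
--     left = 0
--     right = len(num) - 1
--
--     while left <= right:
--         if num[left] == '9' and num[right] == '6':
--             left += 1
--             right -= 1
--         elif num[right] == '9' and num[left] == '6':
--             left += 1
--             right -= 1
--         elif num[right] == num[left] == '0':
--             left += 1
--             right -= 1
--         else:
--             return False
--
--     return True
-- ===== SOURCE B (Python) =====
-- _FLIP = str.maketrans('069', '096')
--
-- def is_flippable_number(num: str):
--     if any(c not in '069' for c in num):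
--         return False
--     return num.translate(_FLIP)[::-1] == num
-- ===== Notes on version B (the rewrite author's own statement) =====
-- stated objective: idiomatic
-- what changed: Replaced the incremental two-pointer short-circuit scan by a validity check on all digits followed by building the flipped string (translate '069'->'096', then reverse) and a single whole-string equality comparison.
import Mathlib
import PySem

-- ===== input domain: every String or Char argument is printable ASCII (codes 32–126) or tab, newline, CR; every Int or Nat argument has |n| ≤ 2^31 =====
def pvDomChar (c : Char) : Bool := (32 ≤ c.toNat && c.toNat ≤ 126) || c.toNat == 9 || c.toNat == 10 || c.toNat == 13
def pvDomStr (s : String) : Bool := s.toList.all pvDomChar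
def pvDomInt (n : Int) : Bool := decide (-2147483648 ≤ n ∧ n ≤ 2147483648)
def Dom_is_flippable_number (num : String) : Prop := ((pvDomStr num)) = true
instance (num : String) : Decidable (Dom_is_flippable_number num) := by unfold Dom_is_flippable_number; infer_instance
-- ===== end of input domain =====

-- B replaces A's two-pointer short-circuit scan by a digit-validity check plus
-- building the flipped string (translate '069'->'096', reverse) and one whole-string
-- equality comparison (objective: idiomatic; same O(n) cost).

-- ===== PORT A =====
-- the while loop of A; indices are Ints as in Python. While the loop runs we have
-- 0 ≤ left ≤ right ≤ len-1, so pyGet? is always some and the getD default is unreachable.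
def pvLoopA (cs : List Char) (left right : Int) : Bool :=
  if _h : left ≤ right then
    let a := (PySem.List.pyGet? cs left).getD ' '
    let b := (PySem.List.pyGet? cs right).getD ' '
    if a = '9' ∧ b = '6' then pvLoopA cs (left + 1) (right - 1)
    else if b = '9' ∧ a = '6' then pvLoopA cs (left + 1) (right - 1)
    else if b = '0' ∧ a = '0' then pvLoopA cs (left + 1) (right - 1)
    else false
  else true
termination_by (right + 1 - left).toNat
decreasing_by all_goals omega

def is_flippable_number (num : String) : Bool :=
  pvLoopA num.toList 0 ((num.toList.length : Int) - 1)

-- ===== PORT B =====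
def pvValidB (c : Char) : Bool := c = '0' || c = '6' || c = '9'

-- the translation table str.maketrans('069','096')
def pvFlipB (c : Char) : Char :=
  if c = '0' then '0' else if c = '6' then '9' else if c = '9' then '6' else c

def is_flippable_number_alt (num : String) : Bool :=
  let cs := num.toList
  if cs.any (fun c => !(pvValidB c)) then false
  else (cs.map pvFlipB).reverse == cs

-- ===== PRECONDITION & SPEC =====
def Spec_is_flippable_number (num : String) (out : Bool) : Prop := out = is_flippable_number_alt num
instance (num : String) (out : Bool) : Decidable (Spec_is_flippable_number num out) := by unfold Spec_is_flippable_number; infer_instance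

-- ===== CLAIM (what is proved, stated in full; the proofs are below) =====
def Claim_equal_is_flippable_number : Prop := ∀ (num : String), Dom_is_flippable_number num → Spec_is_flippable_number num (is_flippable_number num)

-- ===== LEMMAS AND PROOFS =====

-- the pair test A applies at positions (left, right), as one Bool
def pvPairOK (a b : Char) : Bool :=
  (a = '9' && b = '6') || (b = '9' && a = '6') || (b = '0' && a = '0')

theorem pvPairOK_symm (a b : Char) : pvPairOK a b = pvPairOK b a := by
  simp only [pvPairOK]
  by_cases h1 : a = '9' <;> by_cases h2 : b = '6' <;> by_cases h3 : b = '9' <;>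
    by_cases h4 : a = '6' <;> by_cases h5 : b = '0' <;> by_cases h6 : a = '0' <;>
    simp [h1, h2, h3, h4, h5, h6]

theorem pvPairOK_iff (a b : Char) :
    pvPairOK a b = true ↔ (pvValidB a = true ∧ pvFlipB b = a) := by
  constructor
  · intro h
    simp only [pvPairOK, Bool.or_eq_true, Bool.and_eq_true, decide_eq_true_eq] at h
    rcases h with (⟨rfl, rfl⟩ | ⟨rfl, rfl⟩) | ⟨rfl, rfl⟩ <;> decide
  · rintro ⟨hv, hf⟩
    simp only [pvValidB, Bool.or_eq_true, decide_eq_true_eq] at hv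
    rcases hv with (rfl | rfl) | rfl <;>
      · simp only [pvFlipB] at hf
        split_ifs at hf <;> simp_all [pvPairOK]

-- reading pyGet? at a nonnegative index, in List.getD form
theorem pvGetc (cs : List Char) (i : Int) (h0 : 0 ≤ i) :
    (PySem.List.pyGet? cs i).getD ' ' = cs.getD i.toNat ' ' := by
  rw [PySem.List.pyGet?_of_nonneg (xs := cs) (i := i) h0]
  exact List.getD_eq_getElem?_getD.symm

-- one unfolding of the loop when it runs
theorem pvLoopA_step (cs : List Char) (l r : Int) (h : l ≤ r) :
    pvLoopA cs l r =
      (pvPairOK ((PySem.List.pyGet? cs l).getD ' ') ((PySem.List.pyGet? cs r).getD ' ')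
        && pvLoopA cs (l + 1) (r - 1)) := by
  conv_lhs => rw [pvLoopA]
  rw [dif_pos h]
  simp only [pvPairOK]
  split_ifs with h1 h2 h3 <;> simp_all

theorem pvLoopA_exit (cs : List Char) (l r : Int) (h : ¬ l ≤ r) :
    pvLoopA cs l r = true := by
  rw [pvLoopA, dif_neg h]

-- characterisation of A's loop: it accepts iff every pair (i, l+r-i) with l ≤ i ≤ r passes the test
theorem pvLoopA_iff (cs : List Char) (l r : Int) :
    pvLoopA cs l r = true ↔
      ∀ i : Int, l ≤ i → i ≤ r →
        pvPairOK ((PySem.List.pyGet? cs i).getD ' ') ((PySem.List.pyGet? cs (l + r - i)).getD ' ') = true := by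
  by_cases h : l ≤ r
  · rw [pvLoopA_step cs l r h, Bool.and_eq_true, pvLoopA_iff cs (l + 1) (r - 1)]
    constructor
    · rintro ⟨hpair, hrest⟩ i hli hir
      by_cases hil : i = l
      · have e : l + r - i = r := by omega
        rw [e, hil]; exact hpair
      · by_cases hirr : i = r
        · have e : l + r - i = l := by omega
          rw [e, hirr, pvPairOK_symm]; exact hpair
        · have := hrest i (by omega) (by omega)
          have e : l + 1 + (r - 1) - i = l + r - i := by omega
          rwa [e] at this
    · intro hall
      refine ⟨?_, ?_⟩
      · have := hall l (le_refl l) h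
        have e : l + r - l = r := by omega
        rwa [e] at this
      · intro i hli hir
        have := hall i (by omega) (by omega)
        have e : l + 1 + (r - 1) - i = l + r - i := by omega
        rw [e]; exact this
  · rw [pvLoopA_exit cs l r h]
    constructor
    · intro _ i hli hir; exact absurd (hli.trans hir) h
    · intro _; rfl
termination_by (r + 1 - l).toNat
decreasing_by all_goals omega

-- Nat-index form of A's acceptance condition
theorem pvA_iff (cs : List Char) :
    pvLoopA cs 0 ((cs.length : Int) - 1) = true ↔
      ∀ j : Nat, j < cs.length →
        pvPairOK (cs.getD j ' ') (cs.getD (cs.length - 1 - j) ' ') = true := by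
  rw [pvLoopA_iff cs 0 ((cs.length : Int) - 1)]
  constructor
  · intro h j hj
    have := h (j : Int) (by omega) (by omega)
    rw [pvGetc cs (j : Int) (by omega), pvGetc cs (0 + ((cs.length : Int) - 1) - j) (by omega)] at this
    have e1 : ((j : Int)).toNat = j := by omega
    have e2 : (0 + ((cs.length : Int) - 1) - (j : Int)).toNat = cs.length - 1 - j := by omega
    rwa [e1, e2] at this
  · intro h i h0 h1
    rw [pvGetc cs i h0, pvGetc cs (0 + ((cs.length : Int) - 1) - i) (by omega)]
    have e2 : (0 + ((cs.length : Int) - 1) - i).toNat = cs.length - 1 - i.toNat := by omega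
    rw [e2]
    exact h i.toNat (by omega)

-- B's acceptance condition, same Nat-index form
theorem pvB_iff (cs : List Char) :
    (if cs.any (fun c => !(pvValidB c)) then false else ((cs.map pvFlipB).reverse == cs)) = true ↔
      ∀ j : Nat, j < cs.length →
        pvPairOK (cs.getD j ' ') (cs.getD (cs.length - 1 - j) ' ') = true := by
  constructor
  · intro h j hj
    split_ifs at h with hv
    rw [beq_iff_eq] at h
    have hv' : ∀ c ∈ cs, pvValidB c = true := by simpa using hv
    have hval : pvValidB cs[j] = true := hv' _ (List.getElem_mem hj)
    have hflip : pvFlipB (cs[cs.length - 1 - j]'(by omega)) = cs[j] := by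
      have := congrArg (fun l => l[j]?) h
      simp only at this
      rw [List.getElem?_reverse (by simpa using hj), List.length_map] at this
      rw [List.getElem?_map, List.getElem?_eq_getElem (show cs.length - 1 - j < cs.length by omega),
        List.getElem?_eq_getElem hj] at this
      simpa using this
    rw [List.getD_eq_getElem cs ' ' hj,
        List.getD_eq_getElem cs ' ' (show cs.length - 1 - j < cs.length by omega)]
    exact (pvPairOK_iff _ _).mpr ⟨hval, hflip⟩
  · intro h
    have hv : cs.any (fun c => !(pvValidB c)) = false := by
      simp only [List.any_eq_false, Bool.not_eq_true']
      intro c hc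
      obtain ⟨j, hj, rfl⟩ := List.mem_iff_getElem.mp hc
      have hP := h j hj
      rw [List.getD_eq_getElem cs ' ' hj] at hP
      have := ((pvPairOK_iff _ _).mp hP).1
      simp [this]
    rw [hv, if_neg (by simp), beq_iff_eq]
    apply List.ext_getElem
    · simp
    · intro j h1 h2
      simp only [List.getElem_reverse, List.getElem_map, List.length_map]
      have hj : j < cs.length := h2
      have hP := h j hj
      rw [List.getD_eq_getElem cs ' ' hj,
          List.getD_eq_getElem cs ' ' (show cs.length - 1 - j < cs.length by omega)] at hP
      exact ((pvPairOK_iff _ _).mp hP).2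

-- ===== VERDICT (by name: the statement is the Claim_ definition above) =====
theorem is_flippable_number_spec : Claim_equal_is_flippable_number := by
  intro num _
  unfold Spec_is_flippable_number is_flippable_number is_flippable_number_alt
  have hA := pvA_iff num.toList
  have hB := pvB_iff num.toList
  cases hb : pvLoopA num.toList 0 ((num.toList.length : Int) - 1) with
  | true => exact (hB.mpr (hA.mp hb)).symm
  | false =>
    cases hc : (if num.toList.any (fun c => !(pvValidB c)) then false
        else ((num.toList.map pvFlipB).reverse == num.toList)) with
    | false => rfl
    | true => rw [hA.mpr (hB.mp hc)] at hb; cases hb
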